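-- pv_equiv track=rewrite | github.com/SaqlainAlam78/programming_basic_assignment | w3resource.py | larger_string
-- ===== SOURCE A (Python) =====
-- def larger_string(a ,n) :
--     result = ""
--     for i in range(n):
--         if len(a) > 2:
--             result = result + a[0:2]
--         else :
--             result = result + a
--     return result
-- ===== SOURCE B (Python) =====
-- def larger_string(a, n):
--     unit = a[0:2] if len(a) > 2 else a
--     return unit * n
-- ===== Notes on version B (the rewrite author's own statement) =====
-- stated objective: simpler
-- what changed: Hoists the loop-invariant branch out of the loop (the repeated unit is computed once) and replaces the iterative string accumulation with a single closed-form string multiplication unit * n.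
import Mathlib
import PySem

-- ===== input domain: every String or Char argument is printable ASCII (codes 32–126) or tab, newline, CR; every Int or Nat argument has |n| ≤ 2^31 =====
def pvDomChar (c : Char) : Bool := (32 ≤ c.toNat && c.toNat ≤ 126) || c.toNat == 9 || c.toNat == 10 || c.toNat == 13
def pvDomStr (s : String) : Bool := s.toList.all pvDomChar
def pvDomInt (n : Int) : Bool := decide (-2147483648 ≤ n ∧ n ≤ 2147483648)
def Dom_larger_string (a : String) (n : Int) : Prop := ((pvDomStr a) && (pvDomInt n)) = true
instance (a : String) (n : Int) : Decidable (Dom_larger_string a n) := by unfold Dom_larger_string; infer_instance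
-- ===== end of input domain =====

-- B hoists the loop-invariant branch out of A's loop and replaces the iterative
-- accumulation with a closed-form string multiplication (simpler; return value only).

-- ===== PORT A =====
-- A: result = ""; for i in range(n): result += a[0:2] if len(a) > 2 else a
def larger_string (a : String) (n : Int) : String :=
  String.ofList <|
    (PySem.List.pyRange 0 n 1).foldl
      (fun result _ =>
        if 2 < a.toList.length then
          result ++ PySem.List.slice a.toList (some 0) (some 2)
        else
          result ++ a.toList)
      []

-- ===== PORT B =====
-- B: unit = a[0:2] if len(a) > 2 else a; return unit * n  (n ≤ 0 gives "")
def larger_string_alt (a : String) (n : Int) : String :=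
  let unit := if 2 < a.toList.length then PySem.List.slice a.toList (some 0) (some 2) else a.toList
  String.ofList (List.replicate n.toNat unit).flatten

-- ===== PRECONDITION & SPEC =====
def Spec_larger_string (a : String) (n : Int) (out : String) : Prop := out = larger_string_alt a n
instance (a : String) (n : Int) (out : String) : Decidable (Spec_larger_string a n out) := by unfold Spec_larger_string; infer_instance

-- ===== CLAIM (what is proved, stated in full; the proofs are below) =====
def Claim_equal_larger_string : Prop := ∀ (a : String) (n : Int), Dom_larger_string a n → Spec_larger_string a n (larger_string a n)

-- ===== LEMMAS AND PROOFS =====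

-- A loop that appends the same chunk once per element is flatten ∘ replicate.
theorem foldl_append_const {α β : Type} (l : List α) (u : List β) (init : List β) :
    l.foldl (fun r _ => r ++ u) init = init ++ (List.replicate l.length u).flatten := by
  induction l generalizing init with
  | nil => simp
  | cons x xs ih => simp [List.foldl, ih, List.append_assoc, List.replicate_succ]

-- ===== VERDICT (by name: the statement is the Claim_ definition above) =====
theorem larger_string_spec : Claim_equal_larger_string := by
  intro a n _
  unfold Spec_larger_string larger_string larger_string_alt
  have hbody :
      (fun (result : List Char) (_ : Int) =>
        if 2 < a.toList.length then
          result ++ PySem.List.slice a.toList (some 0) (some 2)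
        else
          result ++ a.toList)
      = (fun (result : List Char) (_ : Int) =>
          result ++ (if 2 < a.toList.length then PySem.List.slice a.toList (some 0) (some 2) else a.toList)) := by
    funext r i; split_ifs <;> rfl
  rw [hbody, foldl_append_const, PySem.List.length_pyRange_one]
  simp
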